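-- pv_equiv track=rewrite | github.com/PauloAndr/Teoria_da_Computacao | trabalho_TC.py | afn
-- ===== SOURCE A (Python) =====
-- def E(estados, tabela_transicoes):
--     S = set(estados)
--     estados_nao_visitados = list(estados)
--     while len(estados_nao_visitados) > 0:
--         q = estados_nao_visitados.pop()
--         if (q, 'epsilon') in tabela_transicoes:
--             novos = tabela_transicoes[(q, 'epsilon')].difference(S)
--             S.update(novos)
--             estados_nao_visitados.extend(novos)
--     return S
--
-- def afn(Q, Sigma, tabela_transicoes, q0, F, cadeia):
--     QA = E({q0}, tabela_transicoes)
--     for s in cadeia: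
--         novos_estados_ativos = set()
--         for q in QA:
--             if (q, s) in tabela_transicoes:
--                 novos_estados_ativos.update(E(tabela_transicoes[(q, s)], tabela_transicoes))
--         QA = novos_estados_ativos
--     return len(QA.intersection(F)) != 0
-- ===== SOURCE B (Python) =====
-- def afn(Q, Sigma, tabela_transicoes, q0, F, cadeia):
--     # Round-based fixpoint saturation instead of an explicit worklist stack:
--     # closure() expands the whole active set until it stops changing, and per
--     # symbol we take the closure of the union of targets (instead of the
--     # union of per-target-set closures).
--     def closure(S):
--         S = set(S)
--         while True:
--             T = S | {r for q in S if (q, 'epsilon') in tabela_transicoes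
--                      for r in tabela_transicoes[(q, 'epsilon')]}
--             if T == S:
--                 return S
--             S = T
--
--     QA = closure({q0})
--     for s in cadeia:
--         targets = {r for q in QA if (q, s) in tabela_transicoes
--                    for r in tabela_transicoes[(q, s)]}
--         QA = closure(targets)
--     return not QA.isdisjoint(F)
-- ===== Notes on version B (the rewrite author's own statement) =====
-- stated objective: alternative
-- what changed: Replaces the worklist/stack epsilon-closure routine (pop, set-difference, extend, called once per matching target set) by a whole-set round-based fixpoint saturation applied once per symbol to the union of all targets, and ends with isdisjoint instead of len(intersection)!=0.
import Mathlib
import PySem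

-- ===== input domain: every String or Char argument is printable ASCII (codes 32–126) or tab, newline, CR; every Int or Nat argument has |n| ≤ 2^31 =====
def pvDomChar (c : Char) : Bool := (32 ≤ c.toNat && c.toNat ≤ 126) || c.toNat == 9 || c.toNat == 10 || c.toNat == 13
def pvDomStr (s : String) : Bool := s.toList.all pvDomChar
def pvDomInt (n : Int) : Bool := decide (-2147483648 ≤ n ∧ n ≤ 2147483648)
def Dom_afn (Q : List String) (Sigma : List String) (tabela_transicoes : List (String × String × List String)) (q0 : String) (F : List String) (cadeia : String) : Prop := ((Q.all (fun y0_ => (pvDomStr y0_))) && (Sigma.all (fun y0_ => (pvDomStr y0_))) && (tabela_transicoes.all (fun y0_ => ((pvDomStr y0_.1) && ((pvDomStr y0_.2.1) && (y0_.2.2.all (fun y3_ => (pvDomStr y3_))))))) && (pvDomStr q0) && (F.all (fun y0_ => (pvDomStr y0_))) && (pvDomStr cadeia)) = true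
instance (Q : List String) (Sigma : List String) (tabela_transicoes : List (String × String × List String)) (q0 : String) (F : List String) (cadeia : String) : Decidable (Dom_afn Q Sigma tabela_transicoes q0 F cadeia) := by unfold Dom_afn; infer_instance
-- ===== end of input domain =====

-- B replaces A's worklist-stack epsilon closure (run per matching target set) by a whole-set
-- round-based fixpoint saturation run once per symbol on the union of targets (objective: alternative).
-- Pop order / set-iteration order never reaches the Bool result, so ports use deterministic orders.

-- ===== PORT A =====
-- dict lookup with key (q, s): first match (Python dict keys are unique)
def pvLook (t : List (String × String × List String)) (q s : String) : Option (List String) :=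
  match t with
  | [] => none
  | (a, b, v) :: rest => if a = q && b = s then some v else pvLook rest q s

-- all states occurring in any transition-table value (a finite universe bounding what the
-- worklist can ever add; used only to compute a provably sufficient fuel for the while-loop)
def pvFlat (t : List (String × String × List String)) : List String :=
  t.flatMap (fun e => e.2.2)

-- the 'while len(estados_nao_visitados) > 0' loop of E, fuel makes it total
-- (the fuel chosen in E below is proved sufficient; the stack is popped at the front,
-- which is the same LIFO discipline — Python's set orders are unobservable in the result)
def Eloop (t : List (String × String × List String)) :
    Nat → PySem.Set String → List String → PySem.Set String
  | 0, S, _ => S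
  | _ + 1, S, [] => S
  | f + 1, S, q :: W =>
    match pvLook t q "epsilon" with
    | none => Eloop t f S W
    | some vs =>
        let novos := PySem.Set.diff (PySem.Set.ofList vs) S
        Eloop t f (PySem.Set.update S novos) (novos ++ W)

def E (estados : List String) (t : List (String × String × List String)) : PySem.Set String :=
  let S := PySem.Set.ofList estados
  Eloop t (S.length + 2 * (pvFlat t).length + 1) S S

def afn (Q : List String) (Sigma : List String) (tabela_transicoes : List (String × String × List String)) (q0 : String) (F : List String) (cadeia : String) : Bool :=
  let QA := cadeia.toList.foldl
    (fun QA c =>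
      QA.foldl
        (fun acc q =>
          match pvLook tabela_transicoes q (String.singleton c) with
          | none => acc
          | some vs => PySem.Set.update acc (E vs tabela_transicoes))
        PySem.Set.empty)
    (E [q0] tabela_transicoes)
  decide (PySem.Set.len (PySem.Set.inter QA F) ≠ 0)

-- ===== PORT B =====
-- the 'while True' saturation loop of B's closure(); fuel makes it total
-- (every round before the last adds a state from pvFlat, so the fuel in closureB suffices)
def closLoop (t : List (String × String × List String)) :
    Nat → PySem.Set String → PySem.Set String
  | 0, S => S
  | f + 1, S =>
    let T := PySem.Set.union S
      (PySem.Set.ofList (S.flatMap (fun q => (pvLook t q "epsilon").getD [])))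
    if PySem.Set.equal T S then S else closLoop t f T

def closureB (estados : List String) (t : List (String × String × List String)) : PySem.Set String :=
  closLoop t ((pvFlat t).length + 1) (PySem.Set.ofList estados)

def afn_alt (Q : List String) (Sigma : List String) (tabela_transicoes : List (String × String × List String)) (q0 : String) (F : List String) (cadeia : String) : Bool :=
  let QA := cadeia.toList.foldl
    (fun QA c =>
      closureB (QA.flatMap (fun q => (pvLook tabela_transicoes q (String.singleton c)).getD [])) tabela_transicoes)
    (closureB [q0] tabela_transicoes)
  !(PySem.Set.isdisjoint QA F)

-- ===== PRECONDITION & SPEC =====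
def Spec_afn (Q : List String) (Sigma : List String) (tabela_transicoes : List (String × String × List String)) (q0 : String) (F : List String) (cadeia : String) (out : Bool) : Prop := out = afn_alt Q Sigma tabela_transicoes q0 F cadeia
instance (Q : List String) (Sigma : List String) (tabela_transicoes : List (String × String × List String)) (q0 : String) (F : List String) (cadeia : String) (out : Bool) : Decidable (Spec_afn Q Sigma tabela_transicoes q0 F cadeia out) := by unfold Spec_afn; infer_instance

-- ===== CLAIM (what is proved, stated in full; the proofs are below) =====
def Claim_equal_afn : Prop := ∀ (Q : List String) (Sigma : List String) (tabela_transicoes : List (String × String × List String)) (q0 : String) (F : List String) (cadeia : String), Dom_afn Q Sigma tabela_transicoes q0 F cadeia → Spec_afn Q Sigma tabela_transicoes q0 F cadeia (afn Q Sigma tabela_transicoes q0 F cadeia)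

-- ===== LEMMAS AND PROOFS =====

-- the epsilon successors of a state, and closedness of a set of states under them
def pvTgt (t : List (String × String × List String)) (q : String) : List String :=
  (pvLook t q "epsilon").getD []

def pvClosed (t : List (String × String × List String)) (C : List String) : Prop :=
  ∀ q ∈ C, ∀ r ∈ pvTgt t q, r ∈ C

theorem pvLook_sub_flat (t : List (String × String × List String)) (q s : String)
    (vs : List String) (h : pvLook t q s = some vs) : ∀ r ∈ vs, r ∈ pvFlat t := by
  induction t with
  | nil => simp [pvLook] at h
  | cons e rest ih =>
    obtain ⟨a, b, v⟩ := e
    rw [pvLook] at h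
    split at h
    · cases h
      intro r hr
      simp only [pvFlat, List.flatMap_cons, List.mem_append]
      exact Or.inl hr
    · intro r hr
      have := ih h r hr
      simp only [pvFlat, List.flatMap_cons, List.mem_append]
      exact Or.inr (by simpa [pvFlat] using this)

-- counting helper: adding the fresh states N to S shrinks the "not yet in S" part of the
-- universe U by at least |N| (both closed-loop fuel bounds reduce to this)
theorem pvCount (U N S S' : List String) (hU : U.Nodup) (hN : N.Nodup)
    (hsub : ∀ x ∈ S, x ∈ S') (hNU : ∀ x ∈ N, x ∈ U) (hNS : ∀ x ∈ N, x ∉ S)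
    (hNS' : ∀ x ∈ N, x ∈ S') :
    N.length + (U.filter (fun x => !decide (x ∈ S'))).length ≤
      (U.filter (fun x => !decide (x ∈ S))).length := by
  have h1 : (N ++ U.filter (fun x => !decide (x ∈ S'))).Nodup := by
    refine hN.append (hU.filter _) ?_
    intro x hxN hxF
    have := (List.mem_filter.mp hxF).2
    simp only [Bool.not_eq_eq_eq_not, Bool.not_true, decide_eq_false_iff_not] at this
    exact this (hNS' x hxN)
  have h2 : (N ++ U.filter (fun x => !decide (x ∈ S'))) ⊆ U.filter (fun x => !decide (x ∈ S)) := by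
    intro x hx
    rcases List.mem_append.mp hx with hx | hx
    · exact List.mem_filter.mpr ⟨hNU x hx, by simp [hNS x hx]⟩
    · obtain ⟨hxU, hq⟩ := List.mem_filter.mp hx
      refine List.mem_filter.mpr ⟨hxU, ?_⟩
      simp only [Bool.not_eq_eq_eq_not, Bool.not_true, decide_eq_false_iff_not] at hq ⊢
      exact fun hxS => hq (hsub x hxS)
  have := (List.subperm_of_subset h1 h2).length_le
  simpa using this

-- ---- A side: the worklist loop computes exactly the epsilon closure ----

theorem Eloop_mono (t : List (String × String × List String)) :
    ∀ (f : Nat) (S W : List String) (x : String), x ∈ S → x ∈ Eloop t f S W := by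
  intro f
  induction f with
  | zero => intro S W x hx; simpa [Eloop] using hx
  | succ f ih =>
    intro S W x hx
    cases W with
    | nil => simpa [Eloop] using hx
    | cons q W =>
      rw [Eloop]
      cases hl : pvLook t q "epsilon" with
      | none => exact ih _ _ x hx
      | some vs =>
        exact ih _ _ x ((PySem.Set.mem_update _ _ _).mpr (Or.inl hx))

theorem Eloop_min (t : List (String × String × List String)) :
    ∀ (f : Nat) (S W C : List String), pvClosed t C → (∀ x ∈ S, x ∈ C) → (∀ x ∈ W, x ∈ C) →
      ∀ x ∈ Eloop t f S W, x ∈ C := by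
  intro f
  induction f with
  | zero => intro S W C _ hS _ x hx; exact hS x (by simpa [Eloop] using hx)
  | succ f ih =>
    intro S W C hC hS hW x hx
    cases W with
    | nil => exact hS x (by simpa [Eloop] using hx)
    | cons q W =>
      rw [Eloop] at hx
      have hnovC : ∀ vs, pvLook t q "epsilon" = some vs →
          ∀ y ∈ PySem.Set.diff (PySem.Set.ofList vs) S, y ∈ C := by
        intro vs hl y hy
        have hyvs : y ∈ vs := (PySem.Set.mem_ofList _ _).mp ((PySem.Set.mem_diff _ _ _).mp hy).1
        have : y ∈ pvTgt t q := by simp [pvTgt, hl, hyvs]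
        exact hC q (hW q (List.mem_cons_self)) y this
      cases hl : pvLook t q "epsilon" with
      | none =>
        rw [hl] at hx
        exact ih _ _ _ hC hS (fun y hy => hW y (List.mem_cons_of_mem _ hy)) x hx
      | some vs =>
        rw [hl] at hx
        refine ih _ _ _ hC ?_ ?_ x hx
        · intro y hy
          rcases (PySem.Set.mem_update _ _ _).mp hy with hy | hy
          · exact hS y hy
          · exact hnovC vs hl y hy
        · intro y hy
          rcases List.mem_append.mp hy with hy | hy
          · exact hnovC vs hl y hy
          · exact hW y (List.mem_cons_of_mem _ hy)

theorem Eloop_closed (t : List (String × String × List String)) :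
    ∀ (f : Nat) (S W : List String),
      (∀ p ∈ S, p ∈ W ∨ ∀ r ∈ pvTgt t p, r ∈ S) →
      W.length + 2 * ((PySem.List.dedup (pvFlat t)).filter (fun x => !decide (x ∈ S))).length < f →
      pvClosed t (Eloop t f S W) := by
  intro f
  induction f with
  | zero => intro S W _ hm; omega
  | succ f ih =>
    intro S W hproc hm
    cases W with
    | nil =>
      rw [Eloop]
      intro p hp r hr
      rcases hproc p hp with h | h
      · simp at h
      · exact h r hr
    | cons q W =>
      rw [Eloop]
      cases hl : pvLook t q "epsilon" with
      | none =>
        refine ih S W ?_ ?_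
        · intro p hp
          rcases hproc p hp with h | h
          · rcases List.mem_cons.mp h with rfl | h
            · right; intro r hr; simp [pvTgt, hl] at hr
            · left; exact h
          · right; exact h
        · simp only [List.length_cons] at hm; omega
      | some vs =>
        refine ih _ _ ?_ ?_
        · intro p hp
          rcases (PySem.Set.mem_update _ _ _).mp hp with hp | hp
          · rcases hproc p hp with h | h
            · rcases List.mem_cons.mp h with rfl | h
              · right; intro r hr
                have hrvs : r ∈ vs := by simpa [pvTgt, hl] using hr
                by_cases hrS : r ∈ S
                · exact (PySem.Set.mem_update _ _ _).mpr (Or.inl hrS)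
                · exact (PySem.Set.mem_update _ _ _).mpr (Or.inr
                    ((PySem.Set.mem_diff _ _ _).mpr ⟨(PySem.Set.mem_ofList _ _).mpr hrvs, hrS⟩))
              · left; exact List.mem_append_right _ h
            · right; intro r hr
              exact (PySem.Set.mem_update _ _ _).mpr (Or.inl (h r hr))
          · left; exact List.mem_append_left _ hp
        · have hkey := pvCount (PySem.List.dedup (pvFlat t))
            (PySem.Set.diff (PySem.Set.ofList vs) S) S
            (PySem.Set.update S (PySem.Set.diff (PySem.Set.ofList vs) S))
            (PySem.List.nodup_dedup _)
            (PySem.Set.nodup_diff _ _ (PySem.Set.nodup_ofList _))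
            (fun x hx => (PySem.Set.mem_update _ _ _).mpr (Or.inl hx))
            (fun x hx => (PySem.List.mem_dedup _ _).mpr
              (pvLook_sub_flat t q "epsilon" vs hl x
                ((PySem.Set.mem_ofList _ _).mp ((PySem.Set.mem_diff _ _ _).mp hx).1)))
            (fun x hx => ((PySem.Set.mem_diff _ _ _).mp hx).2)
            (fun x hx => (PySem.Set.mem_update _ _ _).mpr (Or.inr hx))
          simp only [List.length_append, List.length_cons] at hm ⊢
          omega

theorem E_mem (estados : List String) (t : List (String × String × List String)) :
    ∀ x ∈ estados, x ∈ E estados t := by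
  intro x hx
  exact Eloop_mono t _ _ _ x ((PySem.Set.mem_ofList _ _).mpr hx)

theorem E_min (estados : List String) (t : List (String × String × List String))
    (C : List String) (hC : pvClosed t C) (hS : ∀ x ∈ estados, x ∈ C) :
    ∀ x ∈ E estados t, x ∈ C := by
  intro x hx
  refine Eloop_min t _ _ _ C hC ?_ ?_ x hx <;>
    exact fun y hy => hS y ((PySem.Set.mem_ofList _ _).mp hy)

theorem E_closed (estados : List String) (t : List (String × String × List String)) :
    pvClosed t (E estados t) := by
  refine Eloop_closed t _ _ _ (fun p hp => Or.inl hp) ?_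
  have h1 : ((PySem.List.dedup (pvFlat t)).filter
      (fun x => !decide (x ∈ PySem.Set.ofList estados))).length ≤ (pvFlat t).length := by
    calc ((PySem.List.dedup (pvFlat t)).filter _).length
        ≤ (PySem.List.dedup (pvFlat t)).length := List.length_filter_le _ _
      _ ≤ (pvFlat t).length := by
          simpa using PySem.Set.length_ofList_le (pvFlat t)
  omega

-- ---- B side: the saturation loop computes exactly the epsilon closure ----

theorem closLoop_mono (t : List (String × String × List String)) :
    ∀ (f : Nat) (S : List String) (x : String), x ∈ S → x ∈ closLoop t f S := by
  intro f
  induction f with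
  | zero => intro S x hx; simpa [closLoop] using hx
  | succ f ih =>
    intro S x hx
    rw [closLoop]
    split
    · exact hx
    · exact ih _ x ((PySem.Set.mem_union _ _ _).mpr (Or.inl hx))

theorem closLoop_min (t : List (String × String × List String)) :
    ∀ (f : Nat) (S C : List String), pvClosed t C → (∀ x ∈ S, x ∈ C) →
      ∀ x ∈ closLoop t f S, x ∈ C := by
  intro f
  induction f with
  | zero => intro S C _ hS x hx; exact hS x (by simpa [closLoop] using hx)
  | succ f ih =>
    intro S C hC hS x hx
    rw [closLoop] at hx
    split at hx
    · exact hS x hx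
    · refine ih _ C hC ?_ x hx
      intro y hy
      rcases (PySem.Set.mem_union _ _ _).mp hy with hy | hy
      · exact hS y hy
      · obtain ⟨q, hq, hyq⟩ := List.mem_flatMap.mp ((PySem.Set.mem_ofList _ _).mp hy)
        exact hC q (hS q hq) y (by simpa [pvTgt] using hyq)

theorem closLoop_closed (t : List (String × String × List String)) :
    ∀ (f : Nat) (S : List String),
      ((PySem.List.dedup (pvFlat t)).filter (fun x => !decide (x ∈ S))).length < f →
      pvClosed t (closLoop t f S) := by
  intro f
  induction f with
  | zero => intro S hm; omega
  | succ f ih =>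
    intro S hm
    rw [closLoop]
    split
    · next heq =>
      intro p hp r hr
      have hrT : r ∈ PySem.Set.union S
          (PySem.Set.ofList (S.flatMap (fun q => (pvLook t q "epsilon").getD []))) :=
        (PySem.Set.mem_union _ _ _).mpr (Or.inr ((PySem.Set.mem_ofList _ _).mpr
          (List.mem_flatMap.mpr ⟨p, hp, by simpa [pvTgt] using hr⟩)))
      exact ((PySem.Set.equal_iff _ _).mp heq r).mp hrT
    · next heq =>
      set T := PySem.Set.union S
        (PySem.Set.ofList (S.flatMap (fun q => (pvLook t q "epsilon").getD []))) with hT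
      have hex : ∃ x, x ∈ T ∧ x ∉ S := by
        by_contra hno
        refine heq ((PySem.Set.equal_iff _ _).mpr ?_)
        intro z
        refine ⟨fun hz => ?_, fun hz => (PySem.Set.mem_union _ _ _).mpr (Or.inl hz)⟩
        by_contra hzS
        exact hno ⟨z, hz, hzS⟩
      obtain ⟨x, hxT, hxS⟩ := hex
      have hxU : x ∈ PySem.List.dedup (pvFlat t) := by
        rcases (PySem.Set.mem_union _ _ _).mp hxT with hx | hx
        · exact absurd hx hxS
        · obtain ⟨q, _, hxq⟩ := List.mem_flatMap.mp ((PySem.Set.mem_ofList _ _).mp hx)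
          cases hl : pvLook t q "epsilon" with
          | none => rw [hl] at hxq; simp at hxq
          | some vs =>
            rw [hl] at hxq
            exact (PySem.List.mem_dedup _ _).mpr (pvLook_sub_flat t q "epsilon" vs hl x (by simpa using hxq))
      refine ih T ?_
      have hkey := pvCount (PySem.List.dedup (pvFlat t)) [x] S T
        (PySem.List.nodup_dedup _) (List.nodup_singleton x)
        (fun y hy => (PySem.Set.mem_union _ _ _).mpr (Or.inl hy))
        (by intro y hy; rw [List.mem_singleton] at hy; exact hy ▸ hxU)
        (by intro y hy; rw [List.mem_singleton] at hy; exact hy ▸ hxS)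
        (by intro y hy; rw [List.mem_singleton] at hy; exact hy ▸ hxT)
      simp only [List.length_singleton] at hkey
      omega

theorem closureB_mem (estados : List String) (t : List (String × String × List String)) :
    ∀ x ∈ estados, x ∈ closureB estados t := by
  intro x hx
  exact closLoop_mono t _ _ x ((PySem.Set.mem_ofList _ _).mpr hx)

theorem closureB_min (estados : List String) (t : List (String × String × List String))
    (C : List String) (hC : pvClosed t C) (hS : ∀ x ∈ estados, x ∈ C) :
    ∀ x ∈ closureB estados t, x ∈ C := by
  intro x hx
  exact closLoop_min t _ _ C hC (fun y hy => hS y ((PySem.Set.mem_ofList _ _).mp hy)) x hx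

theorem closureB_closed (estados : List String) (t : List (String × String × List String)) :
    pvClosed t (closureB estados t) := by
  refine closLoop_closed t _ _ ?_
  have h1 : ((PySem.List.dedup (pvFlat t)).filter
      (fun x => !decide (x ∈ PySem.Set.ofList estados))).length ≤ (pvFlat t).length := by
    calc ((PySem.List.dedup (pvFlat t)).filter _).length
        ≤ (PySem.List.dedup (pvFlat t)).length := List.length_filter_le _ _
      _ ≤ (pvFlat t).length := by
          simpa using PySem.Set.length_ofList_le (pvFlat t)
  omega

-- ---- the two closures agree in membership ----

theorem closure_agree (estados estados' : List String) (t : List (String × String × List String))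
    (h : ∀ x, x ∈ estados ↔ x ∈ estados') :
    ∀ x, x ∈ E estados t ↔ x ∈ closureB estados' t := by
  intro x
  constructor
  · exact fun hx => E_min estados t _ (closureB_closed estados' t)
      (fun y hy => closureB_mem estados' t y ((h y).mp hy)) x hx
  · exact fun hx => closureB_min estados' t _ (E_closed estados t)
      (fun y hy => E_mem estados t y ((h y).mpr hy)) x hx

-- membership in A's per-symbol union-of-closures fold
theorem mem_stepA (t : List (String × String × List String)) (cs : String) :
    ∀ (l acc : List String) (x : String),
      (x ∈ l.foldl (fun acc q =>
          match pvLook t q cs with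
          | none => acc
          | some vs => PySem.Set.update acc (E vs t)) acc) ↔
      x ∈ acc ∨ ∃ q ∈ l, ∃ vs, pvLook t q cs = some vs ∧ x ∈ E vs t := by
  intro l
  induction l with
  | nil => simp
  | cons q l ih =>
    intro acc x
    rw [List.foldl_cons, ih]
    cases hl : pvLook t q cs with
    | none =>
      rw [show (match (none : Option (List String)) with
            | none => acc
            | some vs => PySem.Set.update acc (E vs t)) = acc from rfl]
      constructor
      · rintro (hx | ⟨q', hq', vs, hvs, hx⟩)
        · exact Or.inl hx
        · exact Or.inr ⟨q', List.mem_cons_of_mem _ hq', vs, hvs, hx⟩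
      · rintro (hx | ⟨q', hq', vs, hvs, hx⟩)
        · exact Or.inl hx
        · rcases List.mem_cons.mp hq' with rfl | hq'
          · rw [hl] at hvs; cases hvs
          · exact Or.inr ⟨q', hq', vs, hvs, hx⟩
    | some vs =>
      rw [show (match (some vs : Option (List String)) with
            | none => acc
            | some vs => PySem.Set.update acc (E vs t)) = PySem.Set.update acc (E vs t) from rfl]
      constructor
      · rintro (hx | ⟨q', hq', vs', hvs', hx⟩)
        · rcases (PySem.Set.mem_update _ _ _).mp hx with hx | hx
          · exact Or.inl hx
          · exact Or.inr ⟨q, List.mem_cons_self, vs, hl, hx⟩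
        · exact Or.inr ⟨q', List.mem_cons_of_mem _ hq', vs', hvs', hx⟩
      · rintro (hx | ⟨q', hq', vs', hvs', hx⟩)
        · exact Or.inl ((PySem.Set.mem_update _ _ _).mpr (Or.inl hx))
        · rcases List.mem_cons.mp hq' with rfl | hq'
          · rw [hl] at hvs'
            cases hvs'
            exact Or.inl ((PySem.Set.mem_update _ _ _).mpr (Or.inr hx))
          · exact Or.inr ⟨q', hq', vs', hvs', hx⟩

theorem step_agree (t : List (String × String × List String)) (cs : String)
    (QA QB : List String) (h : ∀ x, x ∈ QA ↔ x ∈ QB) :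
    ∀ x, (x ∈ QA.foldl (fun acc q =>
            match pvLook t q cs with
            | none => acc
            | some vs => PySem.Set.update acc (E vs t)) PySem.Set.empty) ↔
         x ∈ closureB (QB.flatMap (fun q => (pvLook t q cs).getD [])) t := by
  have hR : ∀ x, (x ∈ QA.foldl (fun acc q =>
      match pvLook t q cs with
      | none => acc
      | some vs => PySem.Set.update acc (E vs t)) PySem.Set.empty) ↔
      ∃ q ∈ QA, ∃ vs, pvLook t q cs = some vs ∧ x ∈ E vs t := by
    intro x
    rw [mem_stepA]
    simp [PySem.Set.empty]
  intro x
  constructor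
  · intro hx0
    obtain ⟨q, hq, vs, hvs, hx⟩ := (hR x).mp hx0
    refine E_min vs t _ (closureB_closed _ t) ?_ x hx
    intro y hy
    refine closureB_mem _ t y (List.mem_flatMap.mpr ⟨q, (h q).mp hq, ?_⟩)
    simp [hvs, hy]
  · intro hx
    refine closureB_min _ t _ ?_ ?_ x hx
    · intro p hp r hr
      rw [hR] at hp ⊢
      obtain ⟨q, hq, vs, hvs, hpE⟩ := hp
      exact ⟨q, hq, vs, hvs, E_closed vs t p hpE r hr⟩
    · intro y hy
      obtain ⟨q, hq, hyq⟩ := List.mem_flatMap.mp hy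
      rw [hR]
      cases hl : pvLook t q cs with
      | none => rw [hl] at hyq; simp at hyq
      | some vs =>
        rw [hl] at hyq
        exact ⟨q, (h q).mpr hq, vs, hl, E_mem vs t y (by simpa using hyq)⟩

theorem fold_agree (t : List (String × String × List String)) :
    ∀ (cs : List Char) (SA SB : List String), (∀ x, x ∈ SA ↔ x ∈ SB) →
      ∀ x, (x ∈ cs.foldl (fun QA c => QA.foldl
              (fun acc q =>
                match pvLook t q (String.singleton c) with
                | none => acc
                | some vs => PySem.Set.update acc (E vs t)) PySem.Set.empty) SA) ↔
           x ∈ cs.foldl (fun QB c =>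
              closureB (QB.flatMap (fun q => (pvLook t q (String.singleton c)).getD [])) t) SB := by
  intro cs
  induction cs with
  | nil => exact fun SA SB h => h
  | cons c cs ih =>
    intro SA SB h
    rw [List.foldl_cons, List.foldl_cons]
    exact ih _ _ (step_agree t (String.singleton c) SA SB h)

theorem lenInter_iff (s F : List String) :
    PySem.Set.len (PySem.Set.inter s F) ≠ 0 ↔ ∃ y, y ∈ s ∧ y ∈ F := by
  constructor
  · intro h
    rcases hi : PySem.Set.inter s F with _ | ⟨y, rest⟩
    · rw [hi] at h; simp [PySem.Set.len] at h
    · exact ⟨y, (PySem.Set.mem_inter _ _ _).mp (by rw [hi]; exact List.mem_cons_self)⟩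
  · rintro ⟨y, hy1, hy2⟩ h
    have hy : y ∈ PySem.Set.inter s F := (PySem.Set.mem_inter _ _ _).mpr ⟨hy1, hy2⟩
    rcases hi : PySem.Set.inter s F with _ | ⟨z, rest⟩
    · rw [hi] at hy; cases hy
    · rw [hi] at h
      simp only [PySem.Set.len, List.length_cons] at h
      omega

theorem notDisjoint_iff (s F : List String) :
    (!(PySem.Set.isdisjoint s F)) = true ↔ ∃ y, y ∈ s ∧ y ∈ F := by
  constructor
  · intro h
    rw [Bool.not_eq_true'] at h
    have h' : ¬ (PySem.Set.isdisjoint s F = true) := by simp [h]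
    rw [PySem.Set.isdisjoint_iff] at h'
    obtain ⟨y, hy⟩ := not_forall.mp h'
    obtain ⟨h1, h2⟩ := Classical.not_imp.mp hy
    exact ⟨y, h1, not_not.mp h2⟩
  · rintro ⟨y, h1, h2⟩
    simp only [Bool.not_eq_true']
    rcases hb : PySem.Set.isdisjoint s F
    · rfl
    · exact absurd h2 ((PySem.Set.isdisjoint_iff _ _).mp hb y h1)

-- ===== VERDICT (by name: the statement is the Claim_ definition above) =====
theorem afn_spec : Claim_equal_afn := by
  intro Q Sigma t q0 F cadeia _
  show afn Q Sigma t q0 F cadeia = afn_alt Q Sigma t q0 F cadeia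
  simp only [afn, afn_alt]
  have h := fold_agree t cadeia.toList (E [q0] t) (closureB [q0] t)
    (closure_agree [q0] [q0] t (fun _ => Iff.rfl))
  rw [Bool.eq_iff_iff, decide_eq_true_eq, lenInter_iff, notDisjoint_iff]
  constructor
  · rintro ⟨y, h1, h2⟩
    exact ⟨y, (h y).mp h1, h2⟩
  · rintro ⟨y, h1, h2⟩
    exact ⟨y, (h y).mpr h1, h2⟩
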